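-- pv_equiv track=rewrite | github.com/Mark-Zwaving/weatherstats-nl | sources/view/text.py | month_name_to_num
-- ===== SOURCE A (Python) =====
-- lst_mmm = ['jan','feb','mar','apr','mai','jun','jul','aug','sep','okt','nov','dec']
--
-- lst_mmmm = ['january','februari','march','april','mai','june','july',
--             'august','september','oktober','november','december']
--
-- def month_name_to_num ( name ):
--     ndx = 0
--     for mmm, mmmm in zip(lst_mmm, lst_mmmm):
--         if name in [mmm,mmmm]:
--             return ndx
--         ndx += 1
--     else:
--         return -1 # Name not found
-- ===== SOURCE B (Python) =====
-- lst_mmm = ['jan','feb','mar','apr','mai','jun','jul','aug','sep','okt','nov','dec']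
--
-- lst_mmmm = ['january','februari','march','april','mai','june','july',
--             'august','september','oktober','november','december']
--
-- def month_name_to_num(name):
--     # Every full name starts with its 3-letter abbreviation, and the
--     # abbreviations are pairwise distinct, so the first three characters
--     # determine the only candidate index; verify and return it.
--     key = name[:3]
--     if key in lst_mmm:
--         i = lst_mmm.index(key)
--         if name == key or name == lst_mmmm[i]:
--             return i
--     return -1
-- ===== Notes on version B (the rewrite author's own statement) =====
-- stated objective: alternative
-- what changed: Instead of scanning zip(lst_mmm, lst_mmmm) in lockstep, B dispatches on the 3-character prefix name[:3]: since every full name starts with its distinct abbreviation, the prefix determines the only candidate index, which is then verified against the two spellings.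
import Mathlib
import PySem

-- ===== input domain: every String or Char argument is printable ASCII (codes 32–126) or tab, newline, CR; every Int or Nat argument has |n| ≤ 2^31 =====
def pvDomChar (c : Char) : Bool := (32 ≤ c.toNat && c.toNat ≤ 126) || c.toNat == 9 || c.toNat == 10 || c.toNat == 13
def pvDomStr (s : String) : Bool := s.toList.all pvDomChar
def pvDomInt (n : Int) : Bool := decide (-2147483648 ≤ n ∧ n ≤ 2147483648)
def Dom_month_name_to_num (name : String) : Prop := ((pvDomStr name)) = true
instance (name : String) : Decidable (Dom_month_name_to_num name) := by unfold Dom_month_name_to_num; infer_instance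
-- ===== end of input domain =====

-- B replaces A's lockstep scan over the zipped lists with a 3-character-prefix dispatch
-- (every full name starts with its distinct abbreviation) followed by verification: alternative.

-- ===== PORT A =====
def lst_mmm : List String :=
  ["jan","feb","mar","apr","mai","jun","jul","aug","sep","okt","nov","dec"]

def lst_mmmm : List String :=
  ["january","februari","march","april","mai","june","july",
   "august","september","oktober","november","december"]

-- the 'for mmm, mmmm in zip(...)' loop with the running ndx; early return on match
def monthScan (name : String) : List (String × String) → Int → Int
  | [], _ => -1
  | (mmm, mmmm) :: rest, ndx =>
      if name ∈ [mmm, mmmm] then ndx else monthScan name rest (ndx + 1)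

def month_name_to_num (name : String) : Int :=
  monthScan name (List.zip lst_mmm lst_mmmm) 0

-- ===== PORT B =====
-- key = name[:3]; if key in lst_mmm: i = lst_mmm.index(key); verify; else -1
def month_name_to_num_alt (name : String) : Int :=
  let key := PySem.Str.slice name none (some 3)
  if key ∈ lst_mmm then
    match PySem.List.index? lst_mmm key with
    | some i =>
        if name = key ∨ name = (PySem.List.pyGet? lst_mmmm (i : Int)).getD "" then (i : Int)
        else -1
    | none => -1
  else -1

-- ===== PRECONDITION & SPEC =====
def Spec_month_name_to_num (name : String) (out : Int) : Prop := out = month_name_to_num_alt name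
instance (name : String) (out : Int) : Decidable (Spec_month_name_to_num name out) := by unfold Spec_month_name_to_num; infer_instance

-- ===== CLAIM (what is proved, stated in full; the proofs are below) =====
def Claim_equal_month_name_to_num : Prop := ∀ (name : String), Dom_month_name_to_num name → Spec_month_name_to_num name (month_name_to_num name)

-- ===== LEMMAS AND PROOFS =====

-- ===== VERDICT (by name: the statement is the Claim_ definition above) =====
theorem month_name_to_num_spec : Claim_equal_month_name_to_num := by
  intro name _
  unfold Spec_month_name_to_num
  by_cases h1 : name = "jan"
  · subst h1; decide
  by_cases h2 : name = "january"
  · subst h2; decide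
  by_cases h3 : name = "feb"
  · subst h3; decide
  by_cases h4 : name = "februari"
  · subst h4; decide
  by_cases h5 : name = "mar"
  · subst h5; decide
  by_cases h6 : name = "march"
  · subst h6; decide
  by_cases h7 : name = "apr"
  · subst h7; decide
  by_cases h8 : name = "april"
  · subst h8; decide
  by_cases h9 : name = "mai"
  · subst h9; decide
  by_cases h10 : name = "jun"
  · subst h10; decide
  by_cases h11 : name = "june"
  · subst h11; decide
  by_cases h12 : name = "jul"
  · subst h12; decide
  by_cases h13 : name = "july"
  · subst h13; decide
  by_cases h14 : name = "aug"
  · subst h14; decide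
  by_cases h15 : name = "august"
  · subst h15; decide
  by_cases h16 : name = "sep"
  · subst h16; decide
  by_cases h17 : name = "september"
  · subst h17; decide
  by_cases h18 : name = "okt"
  · subst h18; decide
  by_cases h19 : name = "oktober"
  · subst h19; decide
  by_cases h20 : name = "nov"
  · subst h20; decide
  by_cases h21 : name = "november"
  · subst h21; decide
  by_cases h22 : name = "dec"
  · subst h22; decide
  by_cases h23 : name = "december"
  · subst h23; decide
  have hA : month_name_to_num name = -1 := by
    simp [month_name_to_num, monthScan, lst_mmm, lst_mmmm, List.zip, List.zipWith, h1, h2, h3, h4, h5, h6, h7, h8, h9, h10, h11, h12, h13, h14, h15, h16, h17, h18, h19, h20, h21, h22, h23]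
  have hB : month_name_to_num_alt name = -1 := by
    simp only [month_name_to_num_alt]
    by_cases hk : PySem.Str.slice name none (some 3) ∈ lst_mmm
    · simp only [lst_mmm, List.mem_cons, List.not_mem_nil, or_false] at hk
      rcases hk with h|h|h|h|h|h|h|h|h|h|h|h <;>
        simp [h, lst_mmm, lst_mmmm, PySem.List.index?_eq_idxOf?, List.idxOf?,
              PySem.List.pyGet?, PySem.List.pyIdx?, List.findIdx?_cons, List.findIdx?_nil, h1, h2, h3, h4, h5, h6, h7, h8, h9, h10, h11, h12, h13, h14, h15, h16, h17, h18, h19, h20, h21, h22, h23]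
    · simp [hk]
  rw [hA, hB]
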